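-- pv_equiv track=rewrite | github.com/suyoung049/TIL | 2024_취업준비/코테/20241022/퍼즐조각.py | change_fragment
-- ===== SOURCE A (Python) =====
-- def change_fragment(fra_set):
--     change_90 = set()
--     change_180 = set()
--     change_270 = set()
--
--     for y, x in fra_set:
--         change_90.add((x, -y))
--         change_180.add((-y, -x))
--         change_270.add((-x, y))
--
--     return change_90, change_180, change_270
-- ===== SOURCE B (Python) =====
-- def change_fragment(fra_set):
--     def rotate90(points):
--         return {(x, -y) for y, x in points}
--
--     change_90 = rotate90(fra_set)
--     change_180 = rotate90(change_90)
--     change_270 = rotate90(change_180)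
--     return change_90, change_180, change_270
-- ===== Notes on version B (the rewrite author's own statement) =====
-- stated objective: simpler
-- what changed: B defines one rotate90 helper and composes it three times (each rotated set feeds the next) instead of A's single loop maintaining three independent sets.
import Mathlib
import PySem

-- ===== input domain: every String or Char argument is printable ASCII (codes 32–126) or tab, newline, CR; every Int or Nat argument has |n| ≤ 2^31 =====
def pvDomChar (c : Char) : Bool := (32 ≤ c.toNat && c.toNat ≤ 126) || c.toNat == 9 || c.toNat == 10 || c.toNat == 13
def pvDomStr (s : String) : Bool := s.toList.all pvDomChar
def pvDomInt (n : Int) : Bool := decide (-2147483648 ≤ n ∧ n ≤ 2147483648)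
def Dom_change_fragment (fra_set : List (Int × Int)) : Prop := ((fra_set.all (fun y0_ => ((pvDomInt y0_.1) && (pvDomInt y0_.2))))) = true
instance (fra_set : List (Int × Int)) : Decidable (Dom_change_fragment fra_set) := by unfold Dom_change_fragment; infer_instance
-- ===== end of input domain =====

-- B composes one rotate90 step three times instead of A's single loop over the input maintaining three sets; same cost, simpler decomposition.

-- ===== PORT A =====
def change_fragment (fra_set : List (Int × Int)) : (List (Int × Int)) × (List (Int × Int)) × (List (Int × Int)) :=
  let st := fra_set.foldl
    (fun (st : List (Int × Int) × List (Int × Int) × List (Int × Int)) p =>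
      (PySem.Set.add st.1 (p.2, -p.1),
       PySem.Set.add st.2.1 (-p.1, -p.2),
       PySem.Set.add st.2.2 (-p.2, p.1)))
    (PySem.Set.empty, PySem.Set.empty, PySem.Set.empty)
  st

-- ===== PORT B =====
def rot90 (p : Int × Int) : Int × Int := (p.2, -p.1)

def rotate90Set (points : List (Int × Int)) : List (Int × Int) :=
  PySem.Set.ofList (points.map rot90)

def change_fragment_alt (fra_set : List (Int × Int)) : (List (Int × Int)) × (List (Int × Int)) × (List (Int × Int)) :=
  let change_90 := rotate90Set fra_set
  let change_180 := rotate90Set change_90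
  let change_270 := rotate90Set change_180
  (change_90, change_180, change_270)

-- ===== PRECONDITION & SPEC =====
def Spec_change_fragment (fra_set : List (Int × Int)) (out : (List (Int × Int)) × (List (Int × Int)) × (List (Int × Int))) : Prop := out = change_fragment_alt fra_set
instance (fra_set : List (Int × Int)) (out : (List (Int × Int)) × (List (Int × Int)) × (List (Int × Int))) : Decidable (Spec_change_fragment fra_set out) := by unfold Spec_change_fragment; infer_instance

-- ===== CLAIM (what is proved, stated in full; the proofs are below) =====
def Claim_equal_change_fragment : Prop := ∀ (fra_set : List (Int × Int)), Dom_change_fragment fra_set → Spec_change_fragment fra_set (change_fragment fra_set)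

-- ===== LEMMAS AND PROOFS =====

theorem rot90_inj : Function.Injective rot90 := by
  intro ⟨a, b⟩ ⟨c, d⟩ h
  simp [rot90] at h
  simp [h.1, h.2]

-- set(map f xs) = map f (set(xs)) for injective f: dedup commutes with an injective map
theorem ofList_map_inj {α : Type} [BEq α] [LawfulBEq α] (f : α → α) (hf : Function.Injective f)
    (l : List α) : PySem.Set.ofList (l.map f) = (PySem.Set.ofList l).map f := by
  induction l using List.reverseRecOn with
  | nil => rfl
  | append_singleton xs x ih =>
    rw [List.map_append, List.map_singleton, PySem.Set.ofList_append_singleton,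
        PySem.Set.ofList_append_singleton, ih]
    by_cases hx : x ∈ PySem.Set.ofList xs
    · have hfx : f x ∈ (PySem.Set.ofList xs).map f := List.mem_map_of_mem hx
      simp [PySem.Set.add, hx, hfx]
    · have hfx : f x ∉ (PySem.Set.ofList xs).map f := by
        intro hmem
        obtain ⟨y, hy, hfy⟩ := List.mem_map.mp hmem
        exact hx (hf hfy ▸ hy)
      simp [PySem.Set.add, hx, hfx]

-- A's fold splits componentwise into three independent folds
theorem foldA_split (l : List (Int × Int)) (a b c : List (Int × Int)) :
    l.foldl
      (fun (st : List (Int × Int) × List (Int × Int) × List (Int × Int)) p =>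
        (PySem.Set.add st.1 (p.2, -p.1),
         PySem.Set.add st.2.1 (-p.1, -p.2),
         PySem.Set.add st.2.2 (-p.2, p.1))) (a, b, c)
    = (l.foldl (fun s p => PySem.Set.add s (p.2, -p.1)) a,
       l.foldl (fun s p => PySem.Set.add s (-p.1, -p.2)) b,
       l.foldl (fun s p => PySem.Set.add s (-p.2, p.1)) c) := by
  induction l generalizing a b c with
  | nil => rfl
  | cons x xs ih => simp only [List.foldl_cons, ih]

theorem foldl_add_90 (l : List (Int × Int)) :
    l.foldl (fun s p => PySem.Set.add s (p.2, -p.1)) PySem.Set.empty = PySem.Set.ofList (l.map rot90) := by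
  rw [PySem.Set.ofList_eq_foldl, List.foldl_map]; rfl

theorem foldl_add_180 (l : List (Int × Int)) :
    l.foldl (fun s p => PySem.Set.add s (-p.1, -p.2)) PySem.Set.empty
      = PySem.Set.ofList (l.map (fun p => (-p.1, -p.2))) := by
  rw [PySem.Set.ofList_eq_foldl, List.foldl_map]
  rfl

theorem foldl_add_270 (l : List (Int × Int)) :
    l.foldl (fun s p => PySem.Set.add s (-p.2, p.1)) PySem.Set.empty
      = PySem.Set.ofList (l.map (fun p => (-p.2, p.1))) := by
  rw [PySem.Set.ofList_eq_foldl, List.foldl_map]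
  rfl

-- ===== VERDICT (by name: the statement is the Claim_ definition above) =====
theorem change_fragment_spec : Claim_equal_change_fragment := by
  intro l _
  show change_fragment l = change_fragment_alt l
  unfold change_fragment change_fragment_alt rotate90Set
  show (List.foldl _ (PySem.Set.empty, PySem.Set.empty, PySem.Set.empty) l) = _
  rw [foldA_split]
  have e90 : l.foldl (fun s p => PySem.Set.add s (p.2, -p.1)) PySem.Set.empty
      = PySem.Set.ofList (l.map rot90) := foldl_add_90 l
  have e180 : l.foldl (fun s p => PySem.Set.add s (-p.1, -p.2)) PySem.Set.empty
      = PySem.Set.ofList (l.map rot90 |>.map rot90) := by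
    rw [foldl_add_180 l, List.map_map]
    rfl
  have e270 : l.foldl (fun s p => PySem.Set.add s (-p.2, p.1)) PySem.Set.empty
      = PySem.Set.ofList (l.map rot90 |>.map rot90 |>.map rot90) := by
    rw [foldl_add_270 l, List.map_map, List.map_map]
    have h3 : ((rot90 ∘ rot90) ∘ rot90) = (fun p : Int × Int => (-p.2, p.1)) := by
      funext p; simp [rot90, Function.comp]
    rw [h3]
  rw [e90, e180, e270]
  simp only [ofList_map_inj rot90 rot90_inj, PySem.Set.ofList_ofList]
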